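-- pv_equiv track=rewrite | github.com/hodayagradwohl/BlockAutomaton | task1.py | get_block_coords
-- ===== SOURCE A (Python) =====
-- def get_block_coords(size, phase, is_wraparound):
--     """
--     This function calculates the coordinates of the blocks in the grid.
--     param size: Size of the grid
--     param phase: The phase of the block.
--     param is_wraparound: If True, the grid wraps around at the edges.
--     return: A list of tuples representing the coordinates of the blocks.
--     """
--     coords = []
--     start = 0 if phase % 2 == 1 else 1  # Blue or red
--     for i in range(start, size, 2):
--         for j in range(start, size, 2):
--             if is_wraparound or (i + 1 < size and j + 1 < size):
--                 coords.append((i, j))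
--     return coords
-- ===== SOURCE B (Python) =====
-- def get_block_coords(size, phase, is_wraparound):
--     start = 1 - phase % 2
--     limit = size if is_wraparound else size - 1
--     n = max(0, (limit - start + 1) // 2)
--     return [(start + 2 * (t // n), start + 2 * (t % n)) for t in range(n * n)]
-- ===== Notes on version B (the rewrite author's own statement) =====
-- stated objective: alternative
-- what changed: Instead of nested loops with a per-cell filter, B computes the count n of valid axis indices by a closed-form division and generates the k-th coordinate pair directly from k via divmod over one flat range of n*n indices.
import Mathlib
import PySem

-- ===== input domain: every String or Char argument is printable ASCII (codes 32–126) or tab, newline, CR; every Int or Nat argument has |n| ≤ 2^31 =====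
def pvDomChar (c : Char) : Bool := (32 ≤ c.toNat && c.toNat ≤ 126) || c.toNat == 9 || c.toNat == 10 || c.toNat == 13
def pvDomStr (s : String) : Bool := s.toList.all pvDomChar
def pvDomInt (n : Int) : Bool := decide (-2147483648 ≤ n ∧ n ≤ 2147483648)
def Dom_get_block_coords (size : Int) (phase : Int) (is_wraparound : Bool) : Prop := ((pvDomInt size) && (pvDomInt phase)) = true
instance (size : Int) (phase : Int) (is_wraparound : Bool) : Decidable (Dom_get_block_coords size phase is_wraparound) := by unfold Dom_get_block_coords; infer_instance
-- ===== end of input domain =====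

-- B replaces A's nested filtered loops by closed-form counting: it computes the number n of
-- valid axis indices arithmetically, then generates the k-th pair directly from k by div/mod
-- over one flat range of n*n indices (alternative algorithm, same cost).

-- ===== PORT A =====
def get_block_coords (size : Int) (phase : Int) (is_wraparound : Bool) : List (Int × Int) :=
  let start : Int := if PySem.Int.mod phase 2 == 1 then 0 else 1
  (PySem.List.pyRange start size 2).foldl (fun coords i =>
    (PySem.List.pyRange start size 2).foldl (fun coords j =>
      if is_wraparound || (decide (i + 1 < size) && decide (j + 1 < size)) then
        coords ++ [(i, j)]
      else coords) coords) []

-- ===== PORT B =====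
def get_block_coords_alt (size : Int) (phase : Int) (is_wraparound : Bool) : List (Int × Int) :=
  let start : Int := 1 - PySem.Int.mod phase 2
  let limit : Int := if is_wraparound then size else size - 1
  let n : Int := max 0 (PySem.Int.floordiv (limit - start + 1) 2)
  (PySem.List.pyRange 0 (n * n) 1).map (fun t =>
    (start + 2 * PySem.Int.floordiv t n, start + 2 * PySem.Int.mod t n))

-- ===== PRECONDITION & SPEC =====
def Spec_get_block_coords (size : Int) (phase : Int) (is_wraparound : Bool) (out : List (Int × Int)) : Prop := out = get_block_coords_alt size phase is_wraparound
instance (size : Int) (phase : Int) (is_wraparound : Bool) (out : List (Int × Int)) : Decidable (Spec_get_block_coords size phase is_wraparound out) := by unfold Spec_get_block_coords; infer_instance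

-- ===== CLAIM =====
def Claim_equal_get_block_coords : Prop := ∀ (size : Int) (phase : Int) (is_wraparound : Bool), Dom_get_block_coords size phase is_wraparound → Spec_get_block_coords size phase is_wraparound (get_block_coords size phase is_wraparound)

-- ===== LEMMAS AND PROOFS =====

-- Factoring A's per-cell test through a per-axis test.
theorem flatMap_filter_factor (l m : List Int) (p : Int → Int → Bool) (q : Int → Bool)
    (h1 : ∀ i, q i = true → ∀ j, p i j = q j)
    (h2 : ∀ i, q i = false → ∀ j, p i j = false) :
    l.flatMap (fun i => (m.filter (p i)).map (fun j => (i, j)))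
      = (l.filter q).flatMap (fun i => (m.filter q).map (fun j => (i, j))) := by
  induction l with
  | nil => simp
  | cons a l ih =>
    cases hq : q a with
    | true =>
      have : m.filter (p a) = m.filter q := by
        apply List.filter_congr
        intro x _
        exact h1 a hq x
      simp [hq, this, ih]
    | false =>
      have : m.filter (p a) = [] := by
        apply List.filter_eq_nil_iff.mpr
        intro x _
        simp [h2 a hq x]
      simp [hq, this, ih]

-- A prefix-shaped filter over a mapped range keeps exactly the first M' elements.
theorem filter_map_range_prefix (M M' : ℕ) (f : ℕ → Int) (p : Int → Bool)
    (h : M' ≤ M) (hp : ∀ k, p (f k) = decide (k < M')) :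
    ((List.range M).map f).filter p = (List.range M').map f := by
  obtain ⟨d, rfl⟩ := Nat.exists_eq_add_of_le h
  rw [List.range_add, List.map_append, List.filter_append, List.map_map]
  have hfst : ((List.range M').map f).filter p = (List.range M').map f := by
    apply List.filter_eq_self.mpr
    intro x hx
    obtain ⟨k, hk, rfl⟩ := List.mem_map.mp hx
    rw [hp]
    simpa using List.mem_range.mp hk
  have hsnd : ((List.range d).map (f ∘ fun x => M' + x)).filter p = [] := by
    apply List.filter_eq_nil_iff.mpr
    intro x hx
    obtain ⟨k, _, rfl⟩ := List.mem_map.mp hx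
    simp [Function.comp, hp]
  rw [hfst, hsnd, List.append_nil]

-- Flat div/mod generation of the Cartesian product of two mapped ranges.
theorem flatMap_range_prod (c m : ℕ) (f g : ℕ → Int) :
    ((List.range c).map f).flatMap (fun i => ((List.range m).map g).map (fun j => (i, j)))
      = (List.range (c * m)).map (fun t => (f (t / m), g (t % m))) := by
  induction c with
  | zero => simp
  | succ c ih =>
    rcases Nat.eq_zero_or_pos m with hm | hm
    · subst hm; simp
    · rw [List.range_succ, List.map_append, List.flatMap_append, ih,
        Nat.succ_mul, List.range_add, List.map_append, List.map_map]
      congr 1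
      simp only [List.map_cons, List.map_nil, List.flatMap_cons, List.flatMap_nil,
        List.append_nil, List.map_map]
      apply List.map_congr_left
      intro k hk
      have hk' : k < m := List.mem_range.mp hk
      have h1 : (c * m + k) / m = c := by
        rw [Nat.add_comm, Nat.add_mul_div_right _ _ hm]
        simp [Nat.div_eq_of_lt hk']
      have h2 : (c * m + k) % m = k := by
        rw [Nat.add_comm, Nat.add_mul_mod_self_right, Nat.mod_eq_of_lt hk']
      simp [Function.comp, h1, h2]

-- The filtered stride-2 axis of A equals a mapped initial segment of List.range.
theorem axis_eq (start size : Int) (w : Bool) :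
    (PySem.List.pyRange start size 2).filter (fun k => w || decide (k + 1 < size))
      = (List.range (max 0 (((if w then size else size - 1) - start + 1) / 2)).toNat).map
          (fun k : ℕ => start + 2 * (k : Int)) := by
  cases w with
  | true =>
    have hif : (if (true = true) then size else size - 1) = size := if_pos rfl
    rw [hif, PySem.List.pyRange_of_pos start size (by norm_num)]
    simp only [Bool.true_or, List.filter_true]
    have hc : (if start < size then ((size - start + 2 - 1) / 2).toNat else 0)
        = (max 0 ((size - start + 1) / 2)).toNat := by
      split_ifs <;> omega
    rw [hc]
  | false =>
    have hif : (if (false = true) then size else size - 1) = size - 1 := if_neg (by decide)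
    rw [hif, PySem.List.pyRange_of_pos start size (by norm_num)]
    simp only [Bool.false_or]
    rcases lt_or_ge start size with h | h
    · rw [if_pos h]
      apply filter_map_range_prefix
      · omega
      · intro k
        simp only [decide_eq_decide]
        omega
    · rw [if_neg (by omega)]
      have : (max 0 ((size - 1 - start + 1) / 2)).toNat = 0 := by omega
      rw [this]
      simp

-- The div/mod generation over List.range equals B's pyRange generation.
theorem gen_eq (start L : Int) :
    (List.range ((max 0 (L / 2)).toNat * (max 0 (L / 2)).toNat)).map
        (fun t => (start + 2 * ((t / (max 0 (L / 2)).toNat : ℕ) : Int),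
                   start + 2 * ((t % (max 0 (L / 2)).toNat : ℕ) : Int)))
      = (PySem.List.pyRange 0 (max 0 (L / 2) * max 0 (L / 2)) 1).map
          (fun t => (start + 2 * PySem.Int.floordiv t (max 0 (L / 2)),
                     start + 2 * PySem.Int.mod t (max 0 (L / 2)))) := by
  set M : ℕ := (max 0 (L / 2)).toNat with hM
  have hcast : max 0 (L / 2) = (M : Int) := by omega
  rw [hcast, PySem.List.pyRange_one]
  have hMM : (((M : Int) * (M : Int) - 0).toNat) = M * M := by
    rw [Int.sub_zero, show ((M:Int) * (M:Int)) = ((M * M : ℕ) : Int) by push_cast; ring,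
      Int.toNat_natCast]
  rw [hMM, List.map_map]
  apply List.map_congr_left
  intro t _
  simp [Function.comp, PySem.Int.floordiv_natCast, PySem.Int.mod_natCast]

-- ===== VERDICT =====
theorem get_block_coords_spec : Claim_equal_get_block_coords := by
  intro size phase w _
  unfold Spec_get_block_coords get_block_coords get_block_coords_alt
  have hstart : (if PySem.Int.mod phase 2 == 1 then (0:Int) else 1) = 1 - PySem.Int.mod phase 2 := by
    rcases PySem.Int.mod_two_eq phase with h | h <;> rw [h] <;> norm_num
  rw [hstart]
  simp only [PySem.List.foldl_append_if, PySem.List.foldl_append_eq_flatMap, List.nil_append]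
  rw [flatMap_filter_factor _ _ _ (fun k => w || decide (k + 1 < size))
    (by intro i hi j; cases w with
        | true => simp
        | false => simp at hi ⊢; omega)
    (by intro i hi j; cases w with
        | true => simp at hi
        | false => simp at hi ⊢; omega)]
  rw [axis_eq, flatMap_range_prod,
    PySem.Int.floordiv_eq_ediv_of_pos (show (0:Int) < 2 by norm_num)]
  cases w with
  | true =>
    have hif : (if (true = true) then size else size - 1) = size := if_pos rfl
    rw [hif]
    exact gen_eq _ _
  | false =>
    have hif : (if (false = true) then size else size - 1) = size - 1 := if_neg (by decide)
    rw [hif]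
    exact gen_eq _ _
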